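-- pv_equiv track=rewrite | github.com/varnish/zipnish | ui/app/utils.py | findTraceDepth
-- ===== SOURCE A (Python) =====
-- def findChildSpans(parent_id, dictionary):
--     span_ids = []
--
--     for key in dictionary:
--         if key != parent_id and dictionary[key] == parent_id:
--             span_ids.append(key)
--
--     return span_ids
--
-- def findSpanDepth(current_depth, selected_span_id, parent_ids, dictionary):
--     if selected_span_id in parent_ids:
--         # find all the spans to which current_span is a parent and find the depth of each of them
--         # selected the highest possible span depth
--         #return findSpanDepth(current_depth + 1, selected_span_id, parent_ids, dictionary)
--         childSpans = findChildSpans(selected_span_id, dictionary)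
--
--         if len(childSpans) == 0:
--             return current_depth
--
--         maxDepth = current_depth
--         for child_span_id in childSpans:
--             maxDepth = max(maxDepth, findSpanDepth(current_depth + 1, child_span_id, parent_ids, dictionary))
--
--         return maxDepth
--
--     return current_depth
--
-- def findTraceDepth(dictionary):
--     parent_ids = []
--     span_ids = []
--
--     root_span_id = None
--
--     for key in dictionary:
--         if dictionary[key] is None:
--             root_span_id = key
--
--         if dictionary[key] is not None and dictionary[key] not in parent_ids:
--             parent_ids.append(dictionary[key])
--
--     # return 0 depth if we cannot find the root span
--     if root_span_id is None:
--         return 0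
--
--     return findSpanDepth(1, root_span_id, parent_ids, dictionary)
-- ===== SOURCE B (Python) =====
-- def findTraceDepth(dictionary):
--     # Build the children adjacency map in one pass, then DFS for the max depth.
--     children = {}
--     root_span_id = None
--
--     for key, parent in dictionary.items():
--         if parent is None:
--             root_span_id = key
--         elif parent != key:  # a self-referencing span can never hang off the root
--             children.setdefault(parent, []).append(key)
--
--     if root_span_id is None:
--         return 0
--
--     def depth(span_id, level):
--         best = level
--         for child in children.get(span_id, []):
--             best = max(best, depth(child, level + 1))
--         return best
--
--     return depth(root_span_id, 1)
-- ===== Notes on version B (the rewrite author's own statement) =====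
-- stated objective: alternative
-- what changed: B builds the children adjacency dict in a single pass over the items and then does one DFS from the root, instead of A's rescanning the whole dict (findChildSpans) at every recursive call.
import Mathlib
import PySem

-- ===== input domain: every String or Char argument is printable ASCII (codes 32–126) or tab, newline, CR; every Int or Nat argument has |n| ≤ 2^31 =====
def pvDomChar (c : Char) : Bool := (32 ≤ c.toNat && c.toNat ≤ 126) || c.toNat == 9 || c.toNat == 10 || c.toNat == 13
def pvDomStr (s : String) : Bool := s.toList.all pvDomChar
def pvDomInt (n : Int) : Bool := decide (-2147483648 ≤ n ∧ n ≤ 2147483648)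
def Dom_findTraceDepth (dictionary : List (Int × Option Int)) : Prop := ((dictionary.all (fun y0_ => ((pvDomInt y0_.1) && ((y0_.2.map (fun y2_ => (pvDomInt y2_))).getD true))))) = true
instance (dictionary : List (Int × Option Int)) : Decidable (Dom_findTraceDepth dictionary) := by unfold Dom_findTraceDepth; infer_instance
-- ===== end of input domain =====

-- B builds the children adjacency dict once and DFSes from the root, instead of A's
-- per-call rescan of the whole dict; same return value on every input.


-- ===== PORT A =====
-- findChildSpans(parent_id, dictionary)
def findChildSpansA (parent_id : Int) (d : PySem.Dict Int (Option Int)) : List Int :=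
  d.keys.foldl
    (fun span_ids key =>
      if key ≠ parent_id ∧ d.getD key none = some parent_id then span_ids ++ [key]
      else span_ids) []

-- findSpanDepth(current_depth, selected_span_id, parent_ids, dictionary); fuel only
-- totalizes the recursion (Python A recurses without a bound)
def findSpanDepthA (fuel : Nat) (current_depth : Int) (selected_span_id : Int)
    (parent_ids : List Int) (d : PySem.Dict Int (Option Int)) : Int :=
  match fuel with
  | 0 => current_depth
  | fuel + 1 =>
    if selected_span_id ∈ parent_ids then
      let childSpans := findChildSpansA selected_span_id d
      if childSpans.length = 0 then current_depth
      else childSpans.foldl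
        (fun maxDepth child_span_id =>
          max maxDepth (findSpanDepthA fuel (current_depth + 1) child_span_id parent_ids d))
        current_depth
    else current_depth

def findTraceDepth (dictionary : List (Int × Option Int)) : Int :=
  let d := PySem.Dict.ofList dictionary
  -- one loop collecting root_span_id (last None key) and parent_ids (dedup of non-None values)
  let st := d.items.foldl
    (fun (st : Option Int × List Int) kv =>
      let root := if kv.2 = none then some kv.1 else st.1
      let ps := match kv.2 with
        | some p => if p ∈ st.2 then st.2 else st.2 ++ [p]
        | none => st.2
      (root, ps)) (none, [])
  match st.1 with
  | none => 0
  | some root_span_id => findSpanDepthA (d.size + 1) 1 root_span_id st.2 d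

-- ===== PORT B =====
-- depth(span_id, level): DFS over the prebuilt children map; fuel only totalizes it
def depthB (fuel : Nat) (children : PySem.Dict Int (List Int)) (span_id : Int) (level : Int) : Int :=
  match fuel with
  | 0 => level
  | fuel + 1 =>
    (children.getD span_id []).foldl
      (fun best child => max best (depthB fuel children child (level + 1))) level

def findTraceDepth_alt (dictionary : List (Int × Option Int)) : Int :=
  let d := PySem.Dict.ofList dictionary
  -- one loop: children.setdefault(parent, []).append(key) and the root
  let st := d.items.foldl
    (fun (st : PySem.Dict Int (List Int) × Option Int) kv =>
      match kv.2 with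
      | none => (st.1, some kv.1)
      | some parent =>
        if parent ≠ kv.1 then (st.1.modify parent [] (· ++ [kv.1]), st.2) else st)
    (PySem.Dict.empty, none)
  match st.2 with
  | none => 0
  | some root_span_id => depthB (d.size + 1) st.1 root_span_id 1

-- ===== PRECONDITION & SPEC =====
def Spec_findTraceDepth (dictionary : List (Int × Option Int)) (out : Int) : Prop := out = findTraceDepth_alt dictionary
instance (dictionary : List (Int × Option Int)) (out : Int) : Decidable (Spec_findTraceDepth dictionary out) := by unfold Spec_findTraceDepth; infer_instance

-- ===== CLAIM (what is proved, stated in full; the proofs are below) =====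
def Claim_equal_findTraceDepth : Prop := ∀ (dictionary : List (Int × Option Int)), Dom_findTraceDepth dictionary → Spec_findTraceDepth dictionary (findTraceDepth dictionary)

-- ===== LEMMAS AND PROOFS =====

-- A's state fold, named for the proofs
def stepA (st : Option Int × List Int) (kv : Int × Option Int) : Option Int × List Int :=
  (if kv.2 = none then some kv.1 else st.1,
   match kv.2 with
   | some p => if p ∈ st.2 then st.2 else st.2 ++ [p]
   | none => st.2)

def stepB (st : PySem.Dict Int (List Int) × Option Int) (kv : Int × Option Int) :
    PySem.Dict Int (List Int) × Option Int :=
  match kv.2 with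
  | none => (st.1, some kv.1)
  | some parent => if parent ≠ kv.1 then (st.1.modify parent [] (· ++ [kv.1]), st.2) else st

theorem stepA_eq (l : List (Int × Option Int)) (st) :
    l.foldl (fun (st : Option Int × List Int) kv =>
      let root := if kv.2 = none then some kv.1 else st.1
      let ps := match kv.2 with
        | some p => if p ∈ st.2 then st.2 else st.2 ++ [p]
        | none => st.2
      (root, ps)) st = l.foldl stepA st := rfl

theorem stepB_eq (l : List (Int × Option Int)) (st) :
    l.foldl (fun (st : PySem.Dict Int (List Int) × Option Int) kv =>
      match kv.2 with
      | none => (st.1, some kv.1)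
      | some parent =>
        if parent ≠ kv.1 then (st.1.modify parent [] (· ++ [kv.1]), st.2) else st) st
    = l.foldl stepB st := rfl

-- the two roots agree
theorem roots_agree (l : List (Int × Option Int)) (r : Option Int) (ps : List Int)
    (c : PySem.Dict Int (List Int)) :
    (l.foldl stepA (r, ps)).1 = (l.foldl stepB (c, r)).2 := by
  induction l generalizing r ps c with
  | nil => rfl
  | cons kv t ih =>
    cases kv with
    | mk k v =>
      cases v with
      | none => simpa [stepA, stepB] using ih _ _ _
      | some p =>
        simp only [List.foldl_cons, stepA, stepB]
        by_cases hpk : p ≠ k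
        · simp only [if_pos hpk]; exact ih _ _ _
        · simp only [if_neg hpk]; exact ih _ _ _

-- membership in A's parent_ids accumulator
theorem mem_parents (l : List (Int × Option Int)) (r : Option Int) (ps : List Int) (x : Int) :
    x ∈ (l.foldl stepA (r, ps)).2 ↔ x ∈ ps ∨ some x ∈ l.map (·.2) := by
  induction l generalizing r ps with
  | nil => simp
  | cons kv t ih =>
    cases kv with
    | mk k v =>
      cases v with
      | none => simp [stepA, ih]
      | some p =>
        simp only [List.foldl_cons, stepA]
        by_cases hp : p ∈ ps
        · simp only [if_pos hp, ih, List.map_cons, List.mem_cons, Option.some.injEq]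
          constructor
          · rintro (h | h) <;> [exact Or.inl h; exact Or.inr (Or.inr h)]
          · rintro (h | h | h)
            · exact Or.inl h
            · exact Or.inl (by rw [h]; exact hp)
            · exact Or.inr h
        · simp only [if_neg hp, ih, List.mem_append, List.map_cons,
            List.mem_cons, Option.some.injEq]
          tauto

-- B's children accumulator characterised as a filter over the items
theorem childrenB_getD (l : List (Int × Option Int)) (c : PySem.Dict Int (List Int))
    (r : Option Int) (s : Int) :
    ((l.foldl stepB (c, r)).1).getD s []
      = c.getD s [] ++ (l.filter (fun kv => kv.2 = some s ∧ kv.1 ≠ s)).map (·.1) := by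
  induction l generalizing c r with
  | nil => simp
  | cons kv t ih =>
    cases kv with
    | mk k v =>
      cases v with
      | none => simp [stepB, ih]
      | some p =>
        simp only [List.foldl_cons, stepB]
        by_cases hpk : p ≠ k
        · simp only [if_pos hpk, ih]
          by_cases hps : p = s
          · subst hps
            have hf : (decide ((some p : Option Int) = some p ∧ k ≠ p)) = true := by
              simp; omega
            rw [PySem.Dict.getD_modify_self]
            simp [List.append_assoc, Ne.symm hpk]
          · have hf : (decide ((some p : Option Int) = some s ∧ k ≠ s)) = false := by
              simp; intro h; exact absurd h.symm (fun hh => hps hh.symm)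
            have hsp : ¬ (s = p) := fun h => hps h.symm
            simp [PySem.Dict.getD_modify, hsp, hps]
        · rw [not_not] at hpk
          subst hpk
          have hf : (decide ((some p : Option Int) = some s ∧ p ≠ s)) = false := by
            simp
          simp [ih]

-- A's findChildSpans characterised as the same filter over the items
theorem childSpansA_eq (d : PySem.Dict Int (Option Int)) (hnd : d.keys.Nodup) (s : Int) :
    findChildSpansA s d
      = (d.items.filter (fun kv => kv.2 = some s ∧ kv.1 ≠ s)).map (·.1) := by
  unfold findChildSpansA
  have h1 : ∀ (acc : List Int),
      d.keys.foldl (fun span_ids key =>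
        if key ≠ s ∧ d.getD key none = some s then span_ids ++ [key] else span_ids) acc
      = acc ++ d.keys.filter (fun key => key ≠ s ∧ d.getD key none = some s) := by
    intro acc
    induction d.keys generalizing acc with
    | nil => simp
    | cons k t ih =>
      by_cases h : k ≠ s ∧ d.getD k none = some s
      · simp [h, ih]
      · simp [ih, h]
  rw [h1, List.nil_append]
  have hkeys : d.keys = d.items.map (·.1) := rfl
  rw [hkeys, List.filter_map]
  apply congrArg
  apply List.filter_congr
  intro kv hkv
  have hget : d.getD kv.1 none = kv.2 :=
    PySem.Dict.getD_of_mem_items d (k := kv.1) (v := kv.2) (by simpa using hkv) hnd none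
  simp only [Function.comp, hget]
  by_cases h2 : kv.2 = some s <;> by_cases h3 : kv.1 = s <;> simp [h2, h3]

-- main recursion equality
theorem depth_eq (fuel : Nat) (d : PySem.Dict Int (Option Int))
    (children : PySem.Dict Int (List Int)) (parent_ids : List Int)
    (hc : ∀ s, children.getD s [] = (d.items.filter (fun kv => kv.2 = some s ∧ kv.1 ≠ s)).map (·.1))
    (hca : ∀ s, findChildSpansA s d = (d.items.filter (fun kv => kv.2 = some s ∧ kv.1 ≠ s)).map (·.1))
    (hp : ∀ s, s ∉ parent_ids → (d.items.filter (fun kv => kv.2 = some s ∧ kv.1 ≠ s)) = []) :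
    ∀ (s level : Int), findSpanDepthA fuel level s parent_ids d = depthB fuel children s level := by
  induction fuel with
  | zero => intro s level; rfl
  | succ fuel ih =>
    intro s level
    simp only [findSpanDepthA, depthB]
    by_cases hs : s ∈ parent_ids
    · simp only [if_pos hs, hca, hc]
      by_cases hlen : ((d.items.filter (fun kv => kv.2 = some s ∧ kv.1 ≠ s)).map (·.1)).length = 0
      · rw [if_pos hlen]
        rw [List.length_eq_zero_iff] at hlen
        rw [hlen]; rfl
      · rw [if_neg hlen]
        apply PySem.List.foldl_congr_mem
        intro acc x _
        rw [ih]
    · simp only [if_neg hs, hc, hp s hs, List.map_nil, List.foldl_nil]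

-- ===== VERDICT (by name: the statement is the Claim_ definition above) =====
theorem findTraceDepth_spec : Claim_equal_findTraceDepth := by
  intro dictionary _
  unfold Spec_findTraceDepth findTraceDepth findTraceDepth_alt
  simp only [stepA_eq, stepB_eq]
  rw [← roots_agree (PySem.Dict.ofList dictionary).items none [] PySem.Dict.empty]
  cases hr : ((PySem.Dict.ofList dictionary).items.foldl stepA (none, [])).1 with
  | none => rfl
  | some root =>
    apply depth_eq
    · intro s
      rw [childrenB_getD]
      simp
    · intro s
      exact childSpansA_eq _ (PySem.Dict.nodup_keys_ofList _) s
    · intro s hs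
      rw [List.filter_eq_nil_iff]
      intro kv hkv
      simp only [decide_eq_true_eq, not_and]
      intro h2 _
      exact hs ((mem_parents _ _ _ _).2 (Or.inr (List.mem_map.2 ⟨kv, hkv, h2⟩)))
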